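-- pv_equiv track=rewrite | github.com/hesamjcy/unlimited_gmail | dots.py | insert_dots
-- ===== SOURCE A (Python) =====
-- from itertools import product
--
-- def insert_dots(input_str):
--     result = []
--     posibility = []
--     charecters = [char for char in input_str]
--     for i in range(len(input_str)-1):
--         posibility.append(0)
--     possible_lists = list(product([0, 1], repeat=len(posibility)))
--     for possible_list in possible_lists:
--         modified_str = ''.join(f'{elem1}.' if elem2 == 1 else elem1 for elem1, elem2 in zip(charecters, possible_list))
--         result.append(modified_str + input_str[-1] + '@gmail.com')
--     return result
-- ===== SOURCE B (Python) =====
-- def insert_dots(input_str):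
--     result = []
--
--     def go(i, prefix):
--         if i == len(input_str) - 1:
--             result.append(prefix + input_str[-1] + '@gmail.com')
--         else:
--             go(i + 1, prefix + input_str[i])
--             go(i + 1, prefix + input_str[i] + '.')
--
--     go(0, '')
--     return result
-- ===== Notes on version B (the rewrite author's own statement) =====
-- stated objective: alternative
-- what changed: Replaces the bitmask enumeration (itertools.product over all 2^(n-1) gap masks, then zip/join per mask) by a depth-first recursion over the string that extends an accumulated prefix with or without a dot at each gap, emitting results at the last character.
import Mathlib
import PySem

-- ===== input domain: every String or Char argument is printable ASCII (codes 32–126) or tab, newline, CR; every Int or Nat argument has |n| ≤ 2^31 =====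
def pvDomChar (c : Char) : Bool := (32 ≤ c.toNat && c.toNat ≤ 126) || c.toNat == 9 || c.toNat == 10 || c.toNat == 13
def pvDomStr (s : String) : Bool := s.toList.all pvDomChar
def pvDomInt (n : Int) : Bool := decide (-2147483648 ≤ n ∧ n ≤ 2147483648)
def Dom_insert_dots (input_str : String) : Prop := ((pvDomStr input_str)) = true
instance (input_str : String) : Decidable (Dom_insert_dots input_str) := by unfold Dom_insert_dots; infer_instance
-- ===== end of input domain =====

-- B replaces A's bitmask enumeration (product over all gap masks) by a depth-first
-- prefix-accumulating recursion over the characters; same outputs in the same order.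


-- ===== PORT A =====
-- list(product([0, 1], repeat=k)), first coordinate varying slowest
def prodBits : Nat → List (List Nat)
  | 0 => [[]]
  | n+1 => ([0, 1] : List Nat).flatMap (fun x => (prodBits n).map (x :: ·))

-- ''.join(f'{c}.' if b == 1 else c for c, b in zip(chars, pl))  (zip truncates)
def zipEnc (chars : List Char) (pl : List Nat) : List Char :=
  ((chars.zip pl).map (fun cb => if cb.2 == 1 then [cb.1, '.'] else [cb.1])).flatten

-- input_str[-1] (for nonempty input; Pre_ excludes "", where Python raises IndexError)
def lastOf (chars : List Char) : List Char :=
  match chars.getLast? with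
  | some c => [c]
  | none => []

def insert_dots (input_str : String) : List String :=
  let chars := input_str.toList
  let possible_lists := prodBits (chars.length - 1)
  possible_lists.foldl
    (fun result pl => result ++ [String.ofList (zipEnc chars pl ++ lastOf chars ++ "@gmail.com".toList)]) []

-- ===== PORT B =====
-- go(i, prefix): at the last character emit prefix+last+'@gmail.com', else branch
-- on no-dot / dot at the gap after character i (empty input: unreachable under Pre_)
def goB : List Char → List Char → List (List Char)
  | [], _ => []
  | [c], pre => [pre ++ [c] ++ "@gmail.com".toList]
  | c :: c' :: rest, pre =>
      goB (c' :: rest) (pre ++ [c]) ++ goB (c' :: rest) (pre ++ [c] ++ ['.'])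

def insert_dots_alt (input_str : String) : List String :=
  (goB input_str.toList []).map String.ofList

-- ===== PRECONDITION & SPEC =====
-- Pre_ excludes only the empty string, on which A raises IndexError (input_str[-1]).
def Pre_insert_dots (input_str : String) : Prop := input_str ≠ ""
instance (input_str : String) : Decidable (Pre_insert_dots input_str) := by
  unfold Pre_insert_dots; infer_instance
def pvWitness_insert_dots : String := "ab"

def Spec_insert_dots (input_str : String) (out : List String) : Prop := out = insert_dots_alt input_str
instance (input_str : String) (out : List String) : Decidable (Spec_insert_dots input_str out) := by unfold Spec_insert_dots; infer_instance

-- ===== CLAIM (what is proved, stated in full; the proofs are below) =====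
def Claim_equal_insert_dots : Prop := ∀ (input_str : String), Dom_insert_dots input_str → Pre_insert_dots input_str → Spec_insert_dots input_str (insert_dots input_str)

-- ===== LEMMAS AND PROOFS =====
theorem foldl_snoc_eq_map {α β : Type} (l : List α) (f : α → β) (acc : List β) :
    l.foldl (fun r x => r ++ [f x]) acc = acc ++ l.map f := by
  induction l generalizing acc with
  | nil => simp
  | cons x xs ih => simp [List.foldl, ih]

theorem goB_eq (rest : List Char) : ∀ (c : Char) (pre : List Char),
    goB (c :: rest) pre =
      (prodBits rest.length).map
        (fun pl => pre ++ (zipEnc (c :: rest) pl ++ lastOf (c :: rest) ++ "@gmail.com".toList)) := by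
  induction rest with
  | nil =>
    intro c pre
    simp [goB, prodBits, zipEnc, lastOf]
  | cons c' rest' ih =>
    intro c pre
    show goB (c :: c' :: rest') pre = _
    rw [goB]
    rw [ih c' (pre ++ [c]), ih c' (pre ++ [c] ++ ['.'])]
    simp only [List.length_cons, prodBits, List.flatMap_cons, List.flatMap_nil,
      List.map_append, List.map_map, List.append_nil]
    congr 1 <;>
      exact List.map_congr_left (fun pl _ => by
        simp [zipEnc, lastOf, List.zip, List.zipWith, List.append_assoc])

theorem insert_dots_spec : Claim_equal_insert_dots := by
  intro s _ hpre
  unfold Spec_insert_dots insert_dots insert_dots_alt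
  have hne : s.toList ≠ [] := by
    intro h
    exact hpre (by
      have := congrArg String.ofList h
      simpa using this)
  cases hlist : s.toList with
  | nil => exact absurd hlist hne
  | cons c rest =>
    rw [foldl_snoc_eq_map, goB_eq]
    simp [List.map_map, Function.comp]
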